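-- pv_equiv track=rewrite | github.com/qxiaobu/MHM | data_processing/extract_time_series.py | build_types
-- ===== SOURCE A (Python) =====
-- def build_types(seqs):
--     '''
--     :param seqs:list,the list of the icd-9
--     :return:
--     types:dict,key:icd-9,value:mutihot,eg dict('D01':1)
--     newSeqs: list,the list of mutihot
--     '''
--     types = {}
--     newSeqs = []
--     for patient in seqs:
--         newPatient = []
--         for visit in patient:
--             newVisit = []
--             for code in visit:
--                 if code in types:
--                     newVisit.append(types[code])
--                 else:
--                     types[code] = len(types)
--                     newVisit.append(types[code])
--             newPatient.append(newVisit)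
--         newSeqs.append(newPatient)
--     return types,newSeqs
-- ===== SOURCE B (Python) =====
-- def build_types(seqs):
--     # Pass 1: build the vocabulary (first-appearance order) only.
--     types = {}
--     for patient in seqs:
--         for visit in patient:
--             for code in visit:
--                 types.setdefault(code, len(types))
--     # Pass 2: encode by pure lookup in the finished dict.
--     newSeqs = [[[types[code] for code in visit] for visit in patient]
--                for patient in seqs]
--     return types, newSeqs
-- ===== Notes on version B (the rewrite author's own statement) =====
-- stated objective: simpler
-- what changed: Replaces A's single fused pass (which threads the dict through the construction of every output list) with two separate phases: one pass that only builds the code->id dict via setdefault, then nested comprehensions that encode the sequences by pure lookup in the finished dict.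
import Mathlib
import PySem

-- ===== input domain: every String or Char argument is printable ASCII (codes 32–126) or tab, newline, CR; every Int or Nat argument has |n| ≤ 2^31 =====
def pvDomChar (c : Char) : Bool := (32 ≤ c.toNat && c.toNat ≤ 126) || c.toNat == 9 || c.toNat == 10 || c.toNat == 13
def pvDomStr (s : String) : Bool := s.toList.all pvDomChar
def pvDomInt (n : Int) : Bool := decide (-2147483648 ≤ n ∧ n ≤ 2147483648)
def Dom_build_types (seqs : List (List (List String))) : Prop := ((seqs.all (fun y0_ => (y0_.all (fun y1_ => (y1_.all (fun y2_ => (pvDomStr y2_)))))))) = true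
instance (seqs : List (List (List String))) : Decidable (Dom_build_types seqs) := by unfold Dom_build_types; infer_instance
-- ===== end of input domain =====

-- B separates A's fused pass into dict-building (setdefault) then pure-lookup encoding; objective: simpler.


-- ===== PORT A =====
-- inner loop body: 'if code in types: newVisit.append(types[code]) else: types[code]=len(types); newVisit.append(types[code])'
def btStepC (st : PySem.Dict String Int × List Int) (code : String) :
    PySem.Dict String Int × List Int :=
  match st.1.get? code with
  | some v => (st.1, st.2 ++ [v])
  | none =>
      let d := st.1.insert code (st.1.size : Int)
      -- types[code] after the insertion always succeeds; getD 0 is exact here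
      (d, st.2 ++ [d.getD code 0])

-- 'for code in visit: …; newPatient.append(newVisit)'
def btStepV (st : PySem.Dict String Int × List (List Int)) (visit : List String) :
    PySem.Dict String Int × List (List Int) :=
  let r := visit.foldl btStepC (st.1, [])
  (r.1, st.2 ++ [r.2])

-- 'for visit in patient: …; newSeqs.append(newPatient)'
def btStepP (st : PySem.Dict String Int × List (List (List Int))) (patient : List (List String)) :
    PySem.Dict String Int × List (List (List Int)) :=
  let r := patient.foldl btStepV (st.1, [])
  (r.1, st.2 ++ [r.2])

def build_types (seqs : List (List (List String))) : (List (String × Int)) × List (List (List Int)) :=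
  let st := seqs.foldl btStepP (PySem.Dict.empty, [])
  (st.1.items, st.2)

-- ===== PORT B =====
-- 'types.setdefault(code, len(types))'
def btSdC (d : PySem.Dict String Int) (code : String) : PySem.Dict String Int :=
  d.setdefault code (d.size : Int)

def btSdV (d : PySem.Dict String Int) (visit : List String) : PySem.Dict String Int :=
  visit.foldl btSdC d

def btSdP (d : PySem.Dict String Int) (patient : List (List String)) : PySem.Dict String Int :=
  patient.foldl btSdV d

def build_types_alt (seqs : List (List (List String))) : (List (String × Int)) × List (List (List Int)) :=
  let types := seqs.foldl btSdP PySem.Dict.empty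
  -- 'types[code]' in the comprehension always succeeds (pass 1 inserted every code); getD 0 is exact
  (types.items,
   seqs.map (fun patient => patient.map (fun visit => visit.map (fun code => types.getD code 0))))

-- ===== PRECONDITION & SPEC =====
def Spec_build_types (seqs : List (List (List String))) (out : (List (String × Int)) × List (List (List Int))) : Prop := out = build_types_alt seqs
instance (seqs : List (List (List String))) (out : (List (String × Int)) × List (List (List Int))) : Decidable (Spec_build_types seqs out) := by unfold Spec_build_types; infer_instance

-- ===== CLAIM (what is proved, stated in full; the proofs are below) =====
def Claim_equal_build_types : Prop := ∀ (seqs : List (List (List String))), Dom_build_types seqs → Spec_build_types seqs (build_types seqs)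

-- ===== LEMMAS AND PROOFS =====

-- d' extends d: every lookup that succeeds in d gives the same value in d'
def DExt (d d' : PySem.Dict String Int) : Prop :=
  ∀ c v, d.get? c = some v → d'.get? c = some v

theorem DExt_refl (d : PySem.Dict String Int) : DExt d d := fun _ _ h => h

theorem DExt_trans {d1 d2 d3 : PySem.Dict String Int} (h1 : DExt d1 d2) (h2 : DExt d2 d3) :
    DExt d1 d3 := fun c v h => h2 c v (h1 c v h)

theorem DExt_sdC (d : PySem.Dict String Int) (code : String) : DExt d (btSdC d code) := by
  intro c v h
  unfold btSdC
  by_cases hc : d.contains code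
  · rw [PySem.Dict.setdefault_of_contains _ _ hc]; exact h
  · rw [PySem.Dict.setdefault_of_not_contains _ _ (by simpa using hc)]
    rcases eq_or_ne c code with rfl | hne
    · exfalso
      have : d.contains c = (d.get? c).isSome := PySem.Dict.contains_eq_isSome_get? d c
      rw [h] at this; simp at this; exact hc (by simp [this])
    · rw [PySem.Dict.get?_insert_of_ne _ _ hne]; exact h

theorem DExt_foldl {α : Type} (f : PySem.Dict String Int → α → PySem.Dict String Int)
    (hf : ∀ d x, DExt d (f d x)) :
    ∀ (l : List α) (d : PySem.Dict String Int), DExt d (l.foldl f d) := by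
  intro l
  induction l with
  | nil => intro d; exact DExt_refl d
  | cons x xs ih => intro d; exact DExt_trans (hf d x) (ih (f d x))

theorem DExt_foldl_sdC (codes : List String) (d : PySem.Dict String Int) :
    DExt d (codes.foldl btSdC d) := DExt_foldl btSdC DExt_sdC codes d

theorem DExt_sdV (d : PySem.Dict String Int) (v : List String) : DExt d (btSdV d v) :=
  DExt_foldl_sdC v d

theorem DExt_foldl_sdV (visits : List (List String)) (d : PySem.Dict String Int) :
    DExt d (visits.foldl btSdV d) := DExt_foldl btSdV DExt_sdV visits d

theorem DExt_foldl_sdP (patients : List (List (List String))) (d : PySem.Dict String Int) :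
    DExt d (patients.foldl btSdP d) :=
  DExt_foldl btSdP (fun d p => DExt_foldl_sdV p d) patients d

theorem getD_of_ext {d d' : PySem.Dict String Int} {c : String} {v : Int}
    (hext : DExt d d') (h : d.get? c = some v) : d'.getD c 0 = v := by
  rw [PySem.Dict.getD_eq_get?_getD, hext c v h]; rfl

-- code level: the fused loop's dict equals B's setdefault fold, and its output
-- is a pure-lookup map in any extension dF of the resulting dict
theorem clevel (codes : List String) :
    ∀ (d : PySem.Dict String Int) (acc : List Int) (dF : PySem.Dict String Int),
      DExt (codes.foldl btSdC d) dF →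
      codes.foldl btStepC (d, acc) =
        (codes.foldl btSdC d, acc ++ codes.map (fun c => dF.getD c 0)) := by
  induction codes with
  | nil => intro d acc dF _; simp
  | cons c cs ih =>
      intro d acc dF hext
      rcases hg : d.get? c with _ | v
      · -- 'code in types' is false: insert, emit the fresh id
        have hnc : d.contains c = false := by
          have := PySem.Dict.contains_eq_isSome_get? d c
          rw [hg] at this; simpa using this
        have hsd : btSdC d c = d.insert c (d.size : Int) := by
          unfold btSdC; exact PySem.Dict.setdefault_of_not_contains _ _ hnc
        have hstep : btStepC (d, acc) c =
            (d.insert c (d.size : Int), acc ++ [(d.size : Int)]) := by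
          unfold btStepC; rw [hg]
          simp [PySem.Dict.getD_insert_self]
        have hget : (d.insert c (d.size : Int)).get? c = some (d.size : Int) :=
          PySem.Dict.get?_insert_self d c _
        have hext' : DExt (cs.foldl btSdC (d.insert c (d.size : Int))) dF := by
          simpa [List.foldl_cons, hsd] using hext
        have hv : dF.getD c 0 = (d.size : Int) :=
          getD_of_ext (DExt_trans (DExt_foldl_sdC cs _) hext') hget
        rw [List.foldl_cons, hstep, ih _ _ dF hext', List.foldl_cons, hsd]
        simp [hv]
      · -- 'code in types' is true: dict unchanged, emit the stored id
        have hc : d.contains c = true := by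
          have := PySem.Dict.contains_eq_isSome_get? d c
          rw [hg] at this; simpa using this
        have hsd : btSdC d c = d := by
          unfold btSdC; exact PySem.Dict.setdefault_of_contains _ _ hc
        have hstep : btStepC (d, acc) c = (d, acc ++ [v]) := by
          unfold btStepC; rw [hg]
        have hext' : DExt (cs.foldl btSdC d) dF := by
          simpa [List.foldl_cons, hsd] using hext
        have hv : dF.getD c 0 = v :=
          getD_of_ext (DExt_trans (DExt_foldl_sdC cs _) hext') hg
        rw [List.foldl_cons, hstep, ih _ _ dF hext', List.foldl_cons, hsd]
        simp [hv]

theorem vlevel (visits : List (List String)) :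
    ∀ (d : PySem.Dict String Int) (acc : List (List Int)) (dF : PySem.Dict String Int),
      DExt (visits.foldl btSdV d) dF →
      visits.foldl btStepV (d, acc) =
        (visits.foldl btSdV d,
         acc ++ visits.map (fun vis => vis.map (fun c => dF.getD c 0))) := by
  induction visits with
  | nil => intro d acc dF _; simp
  | cons v vs ih =>
      intro d acc dF hext
      have hext2 : DExt (vs.foldl btSdV (btSdV d v)) dF := by
        simpa [List.foldl_cons] using hext
      have hCd : DExt (v.foldl btSdC d) dF :=
        DExt_trans (DExt_foldl_sdV vs (btSdV d v)) hext2
      have hc := clevel v d ([] : List Int) dF hCd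
      have hstep : btStepV (d, acc) v =
          (btSdV d v, acc ++ [v.map (fun c => dF.getD c 0)]) := by
        unfold btStepV; rw [hc]; rfl
      rw [List.foldl_cons, hstep, ih _ _ dF hext2, List.foldl_cons]
      simp

theorem plevel (patients : List (List (List String))) :
    ∀ (d : PySem.Dict String Int) (acc : List (List (List Int))) (dF : PySem.Dict String Int),
      DExt (patients.foldl btSdP d) dF →
      patients.foldl btStepP (d, acc) =
        (patients.foldl btSdP d,
         acc ++ patients.map (fun p => p.map (fun vis => vis.map (fun c => dF.getD c 0)))) := by
  induction patients with
  | nil => intro d acc dF _; simp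
  | cons p ps ih =>
      intro d acc dF hext
      have hext2 : DExt (ps.foldl btSdP (btSdP d p)) dF := by
        simpa [List.foldl_cons] using hext
      have hVd : DExt (p.foldl btSdV d) dF :=
        DExt_trans (DExt_foldl_sdP ps (btSdP d p)) hext2
      have hv := vlevel p d ([] : List (List Int)) dF hVd
      have hstep : btStepP (d, acc) p =
          (btSdP d p, acc ++ [p.map (fun vis => vis.map (fun c => dF.getD c 0))]) := by
        unfold btStepP; rw [hv]; rfl
      rw [List.foldl_cons, hstep, ih _ _ dF hext2, List.foldl_cons]
      simp

-- ===== VERDICT (by name: the statement is the Claim_ definition above) =====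
theorem build_types_spec : Claim_equal_build_types := by
  intro seqs _
  unfold Spec_build_types build_types build_types_alt
  rw [plevel seqs PySem.Dict.empty [] (seqs.foldl btSdP PySem.Dict.empty)
        (DExt_refl _)]
  simp
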